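-- pv_equiv track=rewrite | github.com/jiafengjason/workspace | python/waf/ModSecurity/confidence.py | extract_secrule_blocks
-- ===== SOURCE A (Python) =====
-- def extract_secrule_blocks(text):
--     # 支持多行SecRule，按SecRule开头分割
--     blocks = []
--     current = []
--     for line in text.splitlines():
--         if line.strip().startswith('SecRule'):
--             if current:
--                 blocks.append('\n'.join(current))
--                 current = []
--         if line.strip() or current:
--             current.append(line.rstrip())
--     if current:
--         blocks.append('\n'.join(current))
--     return blocks
-- ===== SOURCE B (Python) =====
-- def extract_secrule_blocks(text):
--     lines = text.splitlines()
--
--     def is_rule_start(line):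
--         return line.strip().startswith('SecRule')
--
--     # partition lines into segments: a preamble, then one segment per SecRule line
--     segments = []
--     rest = lines
--     n = 0
--     while n < len(rest) and not is_rule_start(rest[n]):
--         n += 1
--     segments.append(rest[:n])
--     rest = rest[n:]
--     while rest:
--         n = 1
--         while n < len(rest) and not is_rule_start(rest[n]):
--             n += 1
--         segments.append(rest[:n])
--         rest = rest[n:]
--
--     blocks = []
--     for seg in segments:
--         k = 0
--         while k < len(seg) and not seg[k].strip():
--             k += 1
--         body = [line.rstrip() for line in seg[k:]]
--         if body:
--             blocks.append('\n'.join(body))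
--     return blocks
-- ===== Notes on version B (the rewrite author's own statement) =====
-- stated objective: alternative
-- what changed: B first partitions the line list into SecRule-delimited segments (preamble + one segment per SecRule line) and then formats each segment independently (drop leading blanks, rstrip, join), instead of A's single stateful pass that flushes a running line buffer.
import Mathlib
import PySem

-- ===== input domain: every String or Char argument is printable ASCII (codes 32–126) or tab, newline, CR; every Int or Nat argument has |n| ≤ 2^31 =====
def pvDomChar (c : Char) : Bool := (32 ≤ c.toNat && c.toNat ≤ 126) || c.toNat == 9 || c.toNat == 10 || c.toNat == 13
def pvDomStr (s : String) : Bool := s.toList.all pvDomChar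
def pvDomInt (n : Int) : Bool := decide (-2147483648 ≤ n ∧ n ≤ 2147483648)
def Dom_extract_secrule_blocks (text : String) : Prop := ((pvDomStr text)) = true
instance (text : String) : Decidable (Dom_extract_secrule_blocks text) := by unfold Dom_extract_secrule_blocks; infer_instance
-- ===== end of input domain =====

-- B partitions the lines into SecRule-delimited segments first and formats each segment,
-- replacing A's single stateful flush-as-you-go pass (objective: alternative decomposition, same cost).

-- ===== PORT A =====
-- one loop step of A: flush the accumulated buffer on a SecRule line, then append the rstripped line if live
def pvStepA (st : List String × List String) (line : String) : List String × List String :=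
  let st1 :=
    if PySem.Str.startswith (PySem.Str.strip line) "SecRule" then
      (if st.2 ≠ [] then (st.1 ++ [PySem.Str.join "\n" st.2], ([] : List String)) else st)
    else st
  if ¬ (PySem.Str.strip line = "") ∨ st1.2 ≠ [] then (st1.1, st1.2 ++ [PySem.Str.rstrip line]) else st1

def extract_secrule_blocks (text : String) : List String :=
  let fin := (PySem.Str.splitlines text).foldl pvStepA ([], [])
  if fin.2 ≠ [] then fin.1 ++ [PySem.Str.join "\n" fin.2] else fin.1

-- ===== PORT B =====
def pvIsRuleStart (line : String) : Bool :=
  PySem.Str.startswith (PySem.Str.strip line) "SecRule"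

-- segments after the preamble: each starts at a SecRule line and runs to just before the next
def pvSegs : List String → List (List String)
  | [] => []
  | l :: ls =>
      (l :: ls.takeWhile (fun x => !pvIsRuleStart x)) ::
        pvSegs (ls.dropWhile (fun x => !pvIsRuleStart x))
termination_by ls => ls.length
decreasing_by
  simp only [List.length_cons]
  exact Nat.lt_succ_of_le (List.length_dropWhile_le _ _)

-- format one segment: drop leading blank lines, rstrip the rest, keep it only if nonempty
def pvSegBlock (seg : List String) : Option String :=
  let body := (seg.dropWhile (fun x => PySem.Str.strip x == "")).map PySem.Str.rstrip
  if body ≠ [] then some (PySem.Str.join "\n" body) else none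

def extract_secrule_blocks_alt (text : String) : List String :=
  let lines := PySem.Str.splitlines text
  let pre := lines.takeWhile (fun x => !pvIsRuleStart x)
  let rest := lines.dropWhile (fun x => !pvIsRuleStart x)
  (pre :: pvSegs rest).filterMap pvSegBlock

-- ===== PRECONDITION & SPEC =====
def Spec_extract_secrule_blocks (text : String) (out : List String) : Prop := out = extract_secrule_blocks_alt text
instance (text : String) (out : List String) : Decidable (Spec_extract_secrule_blocks text out) := by unfold Spec_extract_secrule_blocks; infer_instance

-- ===== CLAIM (what is proved, stated in full; the proofs are below) =====
def Claim_equal_extract_secrule_blocks : Prop := ∀ (text : String), Dom_extract_secrule_blocks text → Spec_extract_secrule_blocks text (extract_secrule_blocks text)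

-- ===== LEMMAS AND PROOFS =====

-- a SecRule-starting line is not blank
theorem pvIsSec_strip_ne (l : String) (h : pvIsRuleStart l = true) :
    ¬ (PySem.Str.strip l = "") := by
  intro he
  unfold pvIsRuleStart at h
  rw [he] at h
  simp [PySem.Str.startswith] at h
  rw [PySem.Chars.startswith_iff] at h
  simp at h

-- the head of dropWhile p, if any, fails p
theorem pvHead_dropWhile (p : String → Bool) (ls : List String) (x : String)
    (h : (ls.dropWhile p).head? = some x) : p x = false := by
  induction ls with
  | nil => simp at h
  | cons l ls ih =>
    rw [List.dropWhile_cons] at h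
    split at h
    · exact ih h
    · simp_all

-- A's fold over SecRule-free lines with a live current just appends the rstripped lines
theorem pvFoldA_live (ls : List String) (bs c : List String)
    (hsec : ∀ l ∈ ls, pvIsRuleStart l = false) (hc : c ≠ []) :
    ls.foldl pvStepA (bs, c) = (bs, c ++ ls.map PySem.Str.rstrip) := by
  induction ls generalizing c with
  | nil => simp
  | cons l ls ih =>
    have hl : pvIsRuleStart l = false := hsec l (by simp)
    have hstep : pvStepA (bs, c) l = (bs, c ++ [PySem.Str.rstrip l]) := by
      unfold pvStepA
      simp [pvIsRuleStart] at hl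
      simp [hl, hc]
    rw [List.foldl_cons, hstep,
      ih _ (fun x hm => hsec x (by simp [hm])) (by simp)]
    simp

-- A's fold over SecRule-free lines from an empty current skips leading blanks then keeps all
theorem pvFoldA_empty (ls : List String) (bs : List String)
    (hsec : ∀ l ∈ ls, pvIsRuleStart l = false) :
    ls.foldl pvStepA (bs, []) =
      (bs, (ls.dropWhile (fun x => PySem.Str.strip x == "")).map PySem.Str.rstrip) := by
  induction ls with
  | nil => simp
  | cons l ls ih =>
    have hl : pvIsRuleStart l = false := hsec l (by simp)
    by_cases hb : PySem.Str.strip l = ""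
    · have hstep : pvStepA (bs, ([] : List String)) l = (bs, []) := by
        unfold pvStepA
        simp [pvIsRuleStart] at hl
        simp [hb]
      rw [List.foldl_cons, hstep, ih (fun x hm => hsec x (by simp [hm]))]
      simp [hb]
    · have hstep : pvStepA (bs, ([] : List String)) l = (bs, [PySem.Str.rstrip l]) := by
        unfold pvStepA
        simp [pvIsRuleStart] at hl
        simp [hl, hb]
      rw [List.foldl_cons, hstep,
        pvFoldA_live ls bs _ (fun x hm => hsec x (by simp [hm])) (by simp)]
      simp [hb]

-- main invariant: from a SecRule head, A's fold + final flush yields the segment blocks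
theorem pvFoldA_main (n : Nat) (rest : List String) (hn : rest.length ≤ n)
    (hhd : ∀ l, rest.head? = some l → pvIsRuleStart l = true) (bs c : List String) :
    (if (rest.foldl pvStepA (bs, c)).2 ≠ [] then
        (rest.foldl pvStepA (bs, c)).1 ++ [PySem.Str.join "\n" (rest.foldl pvStepA (bs, c)).2]
      else (rest.foldl pvStepA (bs, c)).1) =
      bs ++ (if c ≠ [] then [PySem.Str.join "\n" c] else []) ++ (pvSegs rest).filterMap pvSegBlock := by
  induction n generalizing rest bs c with
  | zero =>
    have hr : rest = [] := List.eq_nil_of_length_eq_zero (Nat.le_zero.mp hn)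
    subst hr
    simp [pvSegs]
    split_ifs <;> simp_all
  | succ n ih =>
    cases rest with
    | nil =>
      simp [pvSegs]
      split_ifs <;> simp_all
    | cons l ls =>
      have hl : pvIsRuleStart l = true := hhd l rfl
      have hnb := pvIsSec_strip_ne l hl
      have hstep : pvStepA (bs, c) l =
          (bs ++ (if c ≠ [] then [PySem.Str.join "\n" c] else []), [PySem.Str.rstrip l]) := by
        unfold pvStepA
        have hl' := hl
        simp [pvIsRuleStart] at hl'
        by_cases hc : c = [] <;> simp [hl', hc, hnb]
      have hseca : ∀ x ∈ ls.takeWhile (fun x => !pvIsRuleStart x), pvIsRuleStart x = false := by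
        intro x hx
        have := List.mem_takeWhile_imp hx
        simpa using this
      have hlive := pvFoldA_live (ls.takeWhile (fun x => !pvIsRuleStart x))
        (bs ++ (if c ≠ [] then [PySem.Str.join "\n" c] else [])) [PySem.Str.rstrip l]
        hseca (by simp)
      have hlen : (ls.dropWhile (fun x => !pvIsRuleStart x)).length ≤ n := by
        have h1 := List.length_dropWhile_le (fun x => !pvIsRuleStart x) ls
        simp at hn
        omega
      have hhdb : ∀ x, (ls.dropWhile (fun x => !pvIsRuleStart x)).head? = some x →
          pvIsRuleStart x = true := by
        intro x hx
        have := pvHead_dropWhile _ ls x hx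
        simpa using this
      have hmain := ih (ls.dropWhile (fun x => !pvIsRuleStart x)) hlen hhdb
        (bs ++ (if c ≠ [] then [PySem.Str.join "\n" c] else []))
        (PySem.Str.rstrip l :: (ls.takeWhile (fun x => !pvIsRuleStart x)).map PySem.Str.rstrip)
      rw [List.foldl_cons, hstep, ← List.takeWhile_append_dropWhile
        (p := fun x => !pvIsRuleStart x) (l := ls), List.foldl_append, hlive]
      simp only [List.singleton_append]
      rw [hmain]
      have hblock : pvSegBlock (l :: ls.takeWhile (fun x => !pvIsRuleStart x)) =
          some (PySem.Str.join "\n"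
            (PySem.Str.rstrip l :: (ls.takeWhile (fun x => !pvIsRuleStart x)).map PySem.Str.rstrip)) := by
        unfold pvSegBlock
        have : (PySem.Str.strip l == "") = false := by
          simpa using hnb
        simp [this]
      rw [List.takeWhile_append_dropWhile, pvSegs, List.filterMap_cons, hblock]
      simp

-- ===== VERDICT (by name: the statement is the Claim_ definition above) =====
theorem extract_secrule_blocks_spec : Claim_equal_extract_secrule_blocks := by
  intro text _
  unfold Spec_extract_secrule_blocks extract_secrule_blocks extract_secrule_blocks_alt
  have hsecpre : ∀ x ∈ (PySem.Str.splitlines text).takeWhile (fun x => !pvIsRuleStart x),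
      pvIsRuleStart x = false := by
    intro x hx; simpa using List.mem_takeWhile_imp hx
  have hhd : ∀ x, ((PySem.Str.splitlines text).dropWhile (fun x => !pvIsRuleStart x)).head? = some x →
      pvIsRuleStart x = true := by
    intro x hx; simpa using pvHead_dropWhile _ _ x hx
  have hempty := pvFoldA_empty
    ((PySem.Str.splitlines text).takeWhile (fun x => !pvIsRuleStart x)) [] hsecpre
  have hmain := pvFoldA_main
    ((PySem.Str.splitlines text).dropWhile (fun x => !pvIsRuleStart x)).length _ le_rfl hhd []
    ((((PySem.Str.splitlines text).takeWhile (fun x => !pvIsRuleStart x)).dropWhile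
        (fun x => PySem.Str.strip x == "")).map PySem.Str.rstrip)
  rw [← List.takeWhile_append_dropWhile (p := fun x => !pvIsRuleStart x)
        (l := PySem.Str.splitlines text), List.foldl_append, hempty, hmain,
      List.takeWhile_append_dropWhile, List.filterMap_cons]
  unfold pvSegBlock
  split_ifs with h <;> simp [h]
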